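-- pv_equiv track=rewrite | github.com/harp-lab/gdlog-multinode | script/compute_rel.py | reorder_relation_columns
-- ===== SOURCE A (Python) =====
-- def reorder_relation_columns(relation_cols, join_columns):
--     canonical_order = [i for i in range(len(relation_cols))]
--     indexed_join_columns = []
--     for i, col in enumerate(relation_cols):
--         if col in join_columns:
--             canonical_order.remove(i)
--             indexed_join_columns.append(i)
--     return indexed_join_columns + canonical_order
-- ===== SOURCE B (Python) =====
-- def reorder_relation_columns(relation_cols, join_columns):
--     # stable sort of index range: join-column indices (key 0) first, rest (key 1) after
--     return sorted(range(len(relation_cols)),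
--                   key=lambda i: 0 if relation_cols[i] in join_columns else 1)
-- ===== Notes on version B (the rewrite author's own statement) =====
-- stated objective: idiomatic
-- what changed: Replaced the explicit two-list partition with list.remove by a single stable keyed sort of range(len(relation_cols)) with a binary key (0 for join columns, 1 otherwise), relying on sort stability to preserve original order within each group.
import Mathlib
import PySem

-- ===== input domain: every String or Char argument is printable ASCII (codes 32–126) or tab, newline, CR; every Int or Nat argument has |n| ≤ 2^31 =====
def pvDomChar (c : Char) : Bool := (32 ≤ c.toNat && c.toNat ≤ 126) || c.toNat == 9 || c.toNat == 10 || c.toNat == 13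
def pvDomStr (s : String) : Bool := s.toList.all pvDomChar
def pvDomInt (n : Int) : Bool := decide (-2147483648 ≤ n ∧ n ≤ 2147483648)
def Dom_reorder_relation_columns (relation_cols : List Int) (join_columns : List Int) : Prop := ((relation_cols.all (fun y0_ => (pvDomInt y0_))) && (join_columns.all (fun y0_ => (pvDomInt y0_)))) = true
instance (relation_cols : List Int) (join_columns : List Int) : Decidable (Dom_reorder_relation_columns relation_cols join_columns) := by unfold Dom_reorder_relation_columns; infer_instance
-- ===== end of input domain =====

-- B replaces A's two-list partition (with list.remove) by one stable keyed sort of the index range (idiomatic).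

-- ===== PORT A =====
-- canonical_order.remove(i): i is always present in canonical_order when reached, so
-- remove? never returns none there; getD's default branch is unreachable.
def reorder_relation_columns (relation_cols : List Int) (join_columns : List Int) : List Int :=
  let canonical_order := PySem.List.pyRange 0 relation_cols.length 1
  let st := (PySem.List.enumerate relation_cols 0).foldl
    (fun (st : List Int × List Int) p =>
      if p.2 ∈ join_columns then
        ((PySem.List.remove? st.1 p.1).getD st.1, st.2 ++ [p.1])
      else st)
    (canonical_order, [])
  st.2 ++ st.1

-- ===== PORT B =====
def reorder_relation_columns_alt (relation_cols : List Int) (join_columns : List Int) : List Int :=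
  PySem.List.sorted (PySem.List.pyRange 0 relation_cols.length 1)
    (fun i => if PySem.List.pyGetD relation_cols i 0 ∈ join_columns then (0 : Int) else 1) false

-- ===== PRECONDITION & SPEC =====
def Spec_reorder_relation_columns (relation_cols : List Int) (join_columns : List Int) (out : List Int) : Prop := out = reorder_relation_columns_alt relation_cols join_columns
instance (relation_cols : List Int) (join_columns : List Int) (out : List Int) : Decidable (Spec_reorder_relation_columns relation_cols join_columns out) := by unfold Spec_reorder_relation_columns; infer_instance

-- ===== CLAIM (what is proved, stated in full; the proofs are below) =====
def Claim_equal_reorder_relation_columns : Prop := ∀ (relation_cols : List Int) (join_columns : List Int), Dom_reorder_relation_columns relation_cols join_columns → Spec_reorder_relation_columns relation_cols join_columns (reorder_relation_columns relation_cols join_columns)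

-- ===== LEMMAS AND PROOFS =====

-- insertBy places x after a block where `before x` is false and before a block where it is true
theorem insertBy_split (before : Int → Int → Bool) (x : Int) :
    ∀ (Z0 Z1 : List Int), (∀ a ∈ Z0, before x a = false) → (∀ b ∈ Z1, before x b = true) →
    PySem.List.insertBy before x (Z0 ++ Z1) = Z0 ++ x :: Z1 := by
  intro Z0
  induction Z0 with
  | nil =>
    intro Z1 _ h1
    cases Z1 with
    | nil => simp [PySem.List.insertBy]
    | cons b bs => simp [PySem.List.insertBy, h1 b (by simp)]
  | cons a Z0 ih =>
    intro Z1 h0 h1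
    simp only [List.cons_append, PySem.List.insertBy, h0 a (by simp)]
    simp [ih Z1 (fun a ha => h0 a (by simp [ha])) h1]

-- the insertion-sort fold with a binary key is the stable partition
theorem foldl_insertBy_binary (k : Int → Int) (hk : ∀ i, k i = 0 ∨ k i = 1) :
    ∀ (L Z0 Z1 : List Int), (∀ a ∈ Z0, k a = 0) → (∀ b ∈ Z1, k b = 1) →
    L.foldl (fun acc x => PySem.List.insertBy (fun a b => decide (k a < k b)) x acc) (Z0 ++ Z1) =
    (Z0 ++ L.filter (fun x => k x == 0)) ++ (Z1 ++ L.filter (fun x => !(k x == 0))) := by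
  intro L
  induction L with
  | nil => intro Z0 Z1 _ _; simp
  | cons x L ih =>
    intro Z0 Z1 h0 h1
    rcases hk x with hx | hx
    · have hins : PySem.List.insertBy (fun a b => decide (k a < k b)) x (Z0 ++ Z1)
          = Z0 ++ x :: Z1 := by
        apply insertBy_split
        · intro a ha; simp [hx, h0 a ha]
        · intro b hb; simp [hx, h1 b hb]
      have : Z0 ++ x :: Z1 = (Z0 ++ [x]) ++ Z1 := by simp
      simp only [List.foldl_cons, hins, this]
      rw [ih (Z0 ++ [x]) Z1 (by intro a ha; rcases List.mem_append.1 ha with h | h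
                                · exact h0 a h
                                · simp at h; simp [h, hx]) h1]
      simp [hx]
    · have hins : PySem.List.insertBy (fun a b => decide (k a < k b)) x (Z0 ++ Z1)
          = (Z0 ++ Z1) ++ [x] := by
        apply PySem.List.insertBy_of_forall_not_before
        intro y _
        rcases hk y with hy | hy <;> simp [hx, hy]
      have : (Z0 ++ Z1) ++ [x] = Z0 ++ (Z1 ++ [x]) := by simp
      simp only [List.foldl_cons, hins, this]
      rw [ih Z0 (Z1 ++ [x]) h0 (by intro b hb; rcases List.mem_append.1 hb with h | h
                                   · exact h1 b h
                                   · simp at h; simp [h, hx])]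
      simp [hx]

-- remove? removes the first occurrence, which sits past a block not containing it
theorem remove?_append_not_mem (v : Int) :
    ∀ (C rest : List Int), v ∉ C →
    PySem.List.remove? (C ++ v :: rest) v = some (C ++ rest) := by
  intro C
  induction C with
  | nil => intro rest _; simp
  | cons c C ih =>
    intro rest hv
    have hcv : c ≠ v := by intro h; exact hv (by simp [h])
    rw [List.cons_append, PySem.List.remove?_cons_of_ne _ hcv,
      ih rest (fun h => hv (by simp [h]))]
    rfl

-- A's loop invariant: canonical = C1 ++ remaining range, with all of C1 below the range
theorem loopA (join_columns : List Int) :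
    ∀ (xs : List Int) (s : Int) (C1 I : List Int), (∀ c ∈ C1, c < s) →
    (PySem.List.enumerate xs s).foldl
      (fun (st : List Int × List Int) p =>
        if p.2 ∈ join_columns then
          ((PySem.List.remove? st.1 p.1).getD st.1, st.2 ++ [p.1])
        else st)
      (C1 ++ PySem.List.pyRange s (s + xs.length) 1, I) =
    (C1 ++ ((PySem.List.enumerate xs s).filter (fun p => !(decide (p.2 ∈ join_columns)))).map (·.1),
     I ++ ((PySem.List.enumerate xs s).filter (fun p => decide (p.2 ∈ join_columns))).map (·.1)) := by
  intro xs
  induction xs with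
  | nil =>
    intro s C1 I _
    simp [PySem.List.enumerate_nil]
  | cons x xs ih =>
    intro s C1 I hC1
    have hrange : PySem.List.pyRange s (s + (x :: xs).length) 1
        = s :: PySem.List.pyRange (s+1) (s + 1 + xs.length) 1 := by
      have hb : s + ((x :: xs).length : Int) = s + 1 + (xs.length : Int) := by
        simp only [List.length_cons]; push_cast; ring
      rw [hb, PySem.List.pyRange_one_cons (by omega)]
    rw [PySem.List.enumerate_cons, hrange]
    by_cases hx : x ∈ join_columns
    · simp only [List.foldl_cons, if_pos hx,
        remove?_append_not_mem s C1 _ (fun h => absurd (hC1 s h) (by omega)),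
        Option.getD_some]
      rw [ih (s+1) C1 (I ++ [s]) (fun c hc => by have := hC1 c hc; omega)]
      simp [hx]
    · simp only [List.foldl_cons, if_neg hx]
      have hsplit : C1 ++ s :: PySem.List.pyRange (s+1) (s + 1 + xs.length) 1
          = (C1 ++ [s]) ++ PySem.List.pyRange (s+1) (s + 1 + xs.length) 1 := by simp
      rw [hsplit, ih (s+1) (C1 ++ [s]) I
        (by intro c hc; rcases List.mem_append.1 hc with h | h
            · have := hC1 c h; omega
            · simp at h; omega)]
      simp [hx]

-- ===== VERDICT (by name: the statement is the Claim_ definition above) =====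
theorem reorder_relation_columns_spec : Claim_equal_reorder_relation_columns := by
  intro relation_cols join_columns _
  unfold Spec_reorder_relation_columns reorder_relation_columns reorder_relation_columns_alt
  set k : Int → Int :=
    fun i => if PySem.List.pyGetD relation_cols i 0 ∈ join_columns then (0 : Int) else 1 with hk
  have hbin : ∀ i, k i = 0 ∨ k i = 1 := by
    intro i; by_cases h : PySem.List.pyGetD relation_cols i 0 ∈ join_columns <;> simp [hk, h]
  -- B side: stable binary-key sort = partition of the range
  have hB : PySem.List.sorted (PySem.List.pyRange 0 relation_cols.length 1) k false
      = (PySem.List.pyRange 0 relation_cols.length 1).filter (fun x => k x == 0)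
        ++ (PySem.List.pyRange 0 relation_cols.length 1).filter (fun x => !(k x == 0)) := by
    have := foldl_insertBy_binary k hbin (PySem.List.pyRange 0 relation_cols.length 1) [] []
      (by simp) (by simp)
    simpa [PySem.List.sorted] using this
  -- A side: the loop yields the same partition, stated over enumerate
  have hA := loopA join_columns relation_cols 0 [] []
    (by intro c hc; simp at hc)
  simp only [List.nil_append, zero_add] at hA
  simp only [hA]
  -- bridge: enumerate = range mapped through (j, relation_cols[j])
  rw [hB, PySem.List.enumerate_eq_map_pyRange relation_cols (0:Int)]
  rw [List.filter_map, List.filter_map, List.map_map, List.map_map]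
  simp only [Function.comp_def, List.map_id', PySem.List.len_eq]
  congr 1
  · apply List.filter_congr
    intro i _
    by_cases h : PySem.List.pyGetD relation_cols i 0 ∈ join_columns <;> simp [hk, h]
  · apply List.filter_congr
    intro i _
    by_cases h : PySem.List.pyGetD relation_cols i 0 ∈ join_columns <;> simp [hk, h]
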